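-- pv_equiv track=rewrite | github.com/FUKUSHUN/cow_python | COW_PROJECT/テストコード/plot_dtw.py | devide_using_walk
-- ===== SOURCE A (Python) =====
-- def devide_using_walk(column):
--     colors = []
--     color_list = ["black", "midnightblue", "blue", "crimson", "magenta", "pink"]
--     for item in column:
--         if (item < 3):
--             colors.append(color_list[0])
--         elif (item < 6):
--             colors.append(color_list[1])
--         elif (item < 9):
--             colors.append(color_list[2])
--         elif (item < 12):
--             colors.append(color_list[3])
--         elif (item < 15):
--             colors.append(color_list[4])
--         else:
--             colors.append(color_list[5])
--     return colors
-- ===== SOURCE B (Python) =====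
-- def devide_using_walk(column):
--     thresholds = [3, 6, 9, 12, 15]
--     color_list = ["black", "midnightblue", "blue", "crimson", "magenta", "pink"]
--     return [color_list[sum(1 for t in thresholds if t <= item)] for item in column]
-- ===== Notes on version B (the rewrite author's own statement) =====
-- stated objective: idiomatic
-- what changed: Replaces A's five-branch if/elif cascade with a single table lookup: the bucket index is the count of thresholds <= item over the sorted threshold table [3,6,9,12,15], used to index the color list in one comprehension.
import Mathlib
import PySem

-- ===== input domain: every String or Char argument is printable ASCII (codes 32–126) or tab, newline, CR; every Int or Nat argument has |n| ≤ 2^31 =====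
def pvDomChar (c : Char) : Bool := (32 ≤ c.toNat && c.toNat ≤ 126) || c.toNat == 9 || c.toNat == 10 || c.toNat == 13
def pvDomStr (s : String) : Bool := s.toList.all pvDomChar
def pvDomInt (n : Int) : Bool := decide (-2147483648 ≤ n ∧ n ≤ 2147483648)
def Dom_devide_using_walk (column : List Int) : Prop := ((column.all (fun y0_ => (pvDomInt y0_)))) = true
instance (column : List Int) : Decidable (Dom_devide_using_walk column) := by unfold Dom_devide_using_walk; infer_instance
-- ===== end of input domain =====

-- B replaces A's if/elif cascade with a count-of-thresholds table lookup (idiomatic, same O(n) cost).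


-- ===== PORT A =====
def devide_using_walk (column : List Int) : List String :=
  let color_list := ["black", "midnightblue", "blue", "crimson", "magenta", "pink"]
  column.foldl (fun colors (item : Int) =>
    colors ++ [if item < 3 then color_list[0]!
               else if item < 6 then color_list[1]!
               else if item < 9 then color_list[2]!
               else if item < 12 then color_list[3]!
               else if item < 15 then color_list[4]!
               else color_list[5]!]) []

-- ===== PORT B =====
def devide_using_walk_alt (column : List Int) : List String :=
  let thresholds : List Int := [3, 6, 9, 12, 15]
  let color_list := ["black", "midnightblue", "blue", "crimson", "magenta", "pink"]
  column.map (fun item => color_list.getD (thresholds.countP (fun t => t ≤ item)) "")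

-- ===== PRECONDITION & SPEC =====
def Spec_devide_using_walk (column : List Int) (out : List String) : Prop := out = devide_using_walk_alt column
instance (column : List Int) (out : List String) : Decidable (Spec_devide_using_walk column out) := by unfold Spec_devide_using_walk; infer_instance

-- ===== CLAIM (what is proved, stated in full; the proofs are below) =====
def Claim_equal_devide_using_walk : Prop := ∀ (column : List Int), Dom_devide_using_walk column → Spec_devide_using_walk column (devide_using_walk column)

-- ===== LEMMAS AND PROOFS =====

-- ===== VERDICT (by name: the statement is the Claim_ definition above) =====
lemma pv_point (item : Int) :
    (if item < 3 then "black"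
     else if item < 6 then "midnightblue"
     else if item < 9 then "blue"
     else if item < 12 then "crimson"
     else if item < 15 then "magenta"
     else "pink")
    = List.getD ["black", "midnightblue", "blue", "crimson", "magenta", "pink"]
        (List.countP (fun t => decide (t ≤ item)) [3, 6, 9, 12, 15]) "" := by
  simp only [List.countP, List.countP.go]
  split_ifs with h1 h2 h3 h4 h5 <;>
    [rw [show decide ((3:Int) ≤ item) = false from by simp; omega,
          show decide ((6:Int) ≤ item) = false from by simp; omega,
          show decide ((9:Int) ≤ item) = false from by simp; omega,
          show decide ((12:Int) ≤ item) = false from by simp; omega,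
          show decide ((15:Int) ≤ item) = false from by simp; omega];
rw [show decide ((3:Int) ≤ item) = true from by simp; omega,
          show decide ((6:Int) ≤ item) = false from by simp; omega,
          show decide ((9:Int) ≤ item) = false from by simp; omega,
          show decide ((12:Int) ≤ item) = false from by simp; omega,
          show decide ((15:Int) ≤ item) = false from by simp; omega];
rw [show decide ((3:Int) ≤ item) = true from by simp; omega,
          show decide ((6:Int) ≤ item) = true from by simp; omega,
          show decide ((9:Int) ≤ item) = false from by simp; omega,
          show decide ((12:Int) ≤ item) = false from by simp; omega,
          show decide ((15:Int) ≤ item) = false from by simp; omega];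
rw [show decide ((3:Int) ≤ item) = true from by simp; omega,
          show decide ((6:Int) ≤ item) = true from by simp; omega,
          show decide ((9:Int) ≤ item) = true from by simp; omega,
          show decide ((12:Int) ≤ item) = false from by simp; omega,
          show decide ((15:Int) ≤ item) = false from by simp; omega];
rw [show decide ((3:Int) ≤ item) = true from by simp; omega,
          show decide ((6:Int) ≤ item) = true from by simp; omega,
          show decide ((9:Int) ≤ item) = true from by simp; omega,
          show decide ((12:Int) ≤ item) = true from by simp; omega,
          show decide ((15:Int) ≤ item) = false from by simp; omega];
rw [show decide ((3:Int) ≤ item) = true from by simp; omega,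
          show decide ((6:Int) ≤ item) = true from by simp; omega,
          show decide ((9:Int) ≤ item) = true from by simp; omega,
          show decide ((12:Int) ≤ item) = true from by simp; omega,
          show decide ((15:Int) ≤ item) = true from by simp; omega]] <;> rfl

theorem devide_using_walk_spec : Claim_equal_devide_using_walk := by
  intro column _
  unfold Spec_devide_using_walk devide_using_walk devide_using_walk_alt
  rw [PySem.List.foldl_append_singleton_eq_map]
  apply List.map_congr_left
  intro item _
  exact pv_point item
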